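-- pv_equiv track=rewrite | github.com/class1c-j/FEUP-FPRO | Play/Py07: Dictionaries & Sets/Pair_of_complete_strs.py | complete_pairs
-- ===== SOURCE A (Python) =====
-- def complete_pairs(s1, s2):
--     pairs = set()
--     for y in s1:
--         for x in s2:
--             a = y + x
--             if set(x for x in 'abcdefghijklmnopqrstuvwxyz') == set(x for x in a):
--                 pairs.add(a)
--     return pairs
-- ===== SOURCE B (Python) =====
-- def complete_pairs(s1, s2):
--     # Stage 1: one 27-bit letter mask per string (bit 26 = any non a-z char).
--     # Stage 2: per DISTINCT mask of s1, compute once (memoised in a dict) the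
--     # sublist of s2 whose mask complements it to the full alphabet; then emit
--     # y + x for the precomputed partners only — no per-pair re-checking.
--     FULL = (1 << 26) - 1
--
--     def mask(s):
--         m = 0
--         for c in s:
--             o = ord(c)
--             m |= (1 << (o - 97)) if 97 <= o <= 122 else (1 << 26)
--         return m
--
--     xmasks = [(x, mask(x)) for x in s2]
--     memo = {}
--     pairs = set()
--     for y in s1:
--         my = mask(y)
--         if my not in memo:
--             memo[my] = [x for x, mx in xmasks if my | mx == FULL]
--         for x in memo[my]:
--             pairs.add(y + x)
--     return pairs
-- ===== Notes on version B (the rewrite author's own statement) =====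
-- stated objective: faster
-- what changed: Replace the per-pair alphabet-set check by staged passes: one 27-bit letter mask per string, then a dict memoising for each distinct s1-mask the sublist of s2 that completes it, so each y just emits concatenations with its precomputed partner list instead of re-checking every pair.
import Mathlib
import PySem

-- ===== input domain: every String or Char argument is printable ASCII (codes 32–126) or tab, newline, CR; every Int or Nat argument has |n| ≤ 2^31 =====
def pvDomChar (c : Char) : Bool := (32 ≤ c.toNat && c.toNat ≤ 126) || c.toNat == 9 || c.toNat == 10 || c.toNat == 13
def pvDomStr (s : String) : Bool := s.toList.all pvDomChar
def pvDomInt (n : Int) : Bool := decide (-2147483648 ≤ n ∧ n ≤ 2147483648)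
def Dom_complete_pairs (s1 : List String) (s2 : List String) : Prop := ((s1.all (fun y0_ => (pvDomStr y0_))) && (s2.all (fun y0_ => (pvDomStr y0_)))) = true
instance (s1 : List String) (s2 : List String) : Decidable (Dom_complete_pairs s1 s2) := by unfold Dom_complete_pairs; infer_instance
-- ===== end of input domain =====

-- B stages the work: one 27-bit letter mask per string, then a dict memoising,
-- per distinct s1-mask, the sublist of s2 that completes it, so the inner
-- per-pair alphabet check disappears; objective: faster.

-- ===== PORT A =====
def complete_pairs (s1 : List String) (s2 : List String) : List String :=
  s1.foldl (fun pairs y =>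
    s2.foldl (fun pairs x =>
      let a := String.ofList (y.toList ++ x.toList)
      if PySem.Set.equal (PySem.Set.ofList "abcdefghijklmnopqrstuvwxyz".toList)
                         (PySem.Set.ofList a.toList)
      then PySem.Set.add pairs a else pairs) pairs) PySem.Set.empty

-- ===== PORT B =====
-- mask(s): OR of per-char bits; bit 26 flags any char outside a-z
def pvBit (c : Char) : Nat :=
  if 97 ≤ c.toNat ∧ c.toNat ≤ 122 then 1 <<< (c.toNat - 97) else 1 <<< 26

def pvMask (s : String) : Nat := s.toList.foldl (fun m c => m ||| pvBit c) 0

def pvFULL : Nat := (1 <<< 26) - 1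

def complete_pairs_alt (s1 : List String) (s2 : List String) : List String :=
  let xmasks := s2.map (fun x => (x, pvMask x))
  (s1.foldl (fun (st : PySem.Dict Nat (List String) × List String) y =>
      let my := pvMask y
      let memo := if st.1.contains my then st.1
                  else st.1.insert my
                    ((xmasks.filter (fun q => (my ||| q.2) == pvFULL)).map Prod.fst)
      (memo, (memo.getD my []).foldl
        (fun p x => PySem.Set.add p (String.ofList (y.toList ++ x.toList))) st.2))
    (PySem.Dict.empty, PySem.Set.empty)).2

-- ===== PRECONDITION & SPEC =====
def Spec_complete_pairs (s1 : List String) (s2 : List String) (out : List String) : Prop := out = complete_pairs_alt s1 s2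
instance (s1 : List String) (s2 : List String) (out : List String) : Decidable (Spec_complete_pairs s1 s2 out) := by unfold Spec_complete_pairs; infer_instance

-- ===== CLAIM (what is proved, stated in full; the proofs are below) =====
def Claim_equal_complete_pairs : Prop := ∀ (s1 : List String) (s2 : List String), Dom_complete_pairs s1 s2 → Spec_complete_pairs s1 s2 (complete_pairs s1 s2)

-- ===== LEMMAS AND PROOFS =====

-- index of the bit pvBit sets
def pvIdx (c : Char) : Nat :=
  if 97 ≤ c.toNat ∧ c.toNat ≤ 122 then c.toNat - 97 else 26

lemma pvBit_eq_pow (c : Char) : pvBit c = 2 ^ pvIdx c := by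
  unfold pvBit pvIdx; split_ifs <;> simp [Nat.one_shiftLeft]

def pvMaskL (l : List Char) : Nat := l.foldl (fun m c => m ||| pvBit c) 0

lemma pvMaskL_foldl (l : List Char) (m : Nat) :
    l.foldl (fun m c => m ||| pvBit c) m = m ||| pvMaskL l := by
  induction l generalizing m with
  | nil => rw [pvMaskL, List.foldl_nil, List.foldl_nil, Nat.or_zero]
  | cons c t ih =>
    rw [List.foldl_cons, ih]
    have h : pvMaskL (c :: t) = pvBit c ||| pvMaskL t := by
      rw [pvMaskL, List.foldl_cons, ih, Nat.zero_or]
    rw [h, Nat.or_assoc]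

lemma pvMaskL_append (l l' : List Char) :
    pvMaskL (l ++ l') = pvMaskL l ||| pvMaskL l' := by
  rw [pvMaskL, List.foldl_append, pvMaskL_foldl]
  rfl

lemma testBit_pvMaskL (l : List Char) (i : Nat) :
    Nat.testBit (pvMaskL l) i = true ↔ ∃ c ∈ l, pvIdx c = i := by
  induction l with
  | nil => simp [pvMaskL]
  | cons c t ih =>
    have : pvMaskL (c :: t) = pvBit c ||| pvMaskL t := by
      have := pvMaskL_append [c] t
      simpa [pvMaskL] using this
    rw [this, Nat.testBit_or, pvBit_eq_pow, Nat.testBit_two_pow]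
    simp only [Bool.or_eq_true, decide_eq_true_eq, ih]
    constructor
    · rintro (h | ⟨d, hd, hi⟩)
      · exact ⟨c, by simp, h⟩
      · exact ⟨d, by simp [hd], hi⟩
    · rintro ⟨d, hd, hi⟩
      rcases List.mem_cons.mp hd with rfl | hd
      · exact Or.inl hi
      · exact Or.inr ⟨d, hd, hi⟩

def pvAlpha : List Char := "abcdefghijklmnopqrstuvwxyz".toList

lemma pvAlpha_eq : pvAlpha = (List.range 26).map (fun i => Char.ofNat (97 + i)) := by decide

lemma toNat_ofNat_letter (i : Nat) (hi : i < 26) : (Char.ofNat (97 + i)).toNat = 97 + i := by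
  interval_cases i <;> decide

lemma mem_pvAlpha_iff (c : Char) : c ∈ pvAlpha ↔ 97 ≤ c.toNat ∧ c.toNat ≤ 122 := by
  rw [pvAlpha_eq]
  simp only [List.mem_map, List.mem_range]
  constructor
  · rintro ⟨i, hi, rfl⟩
    rw [toNat_ofNat_letter i hi]; omega
  · rintro ⟨h1, h2⟩
    refine ⟨c.toNat - 97, by omega, ?_⟩
    have h : 97 + (c.toNat - 97) = c.toNat := by omega
    rw [h, Char.ofNat_toNat]

lemma mask_full_iff (l : List Char) :
    pvMaskL l = (1 <<< 26) - 1 ↔ (∀ c, c ∈ pvAlpha ↔ c ∈ l) := by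
  have hfull : (1 <<< 26 - 1 : Nat) = 2 ^ 26 - 1 := by norm_num [Nat.one_shiftLeft]
  constructor
  · intro h c
    have hbit : ∀ i, (∃ d ∈ l, pvIdx d = i) ↔ i < 26 := by
      intro i
      rw [← testBit_pvMaskL, h, hfull, Nat.testBit_two_pow_sub_one]
      simp
    constructor
    · intro hc
      rcases (mem_pvAlpha_iff c).mp hc with ⟨h1, h2⟩
      have : c.toNat - 97 < 26 := by omega
      rcases (hbit (c.toNat - 97)).mpr this with ⟨d, hd, hidx⟩
      have hdl : 97 ≤ d.toNat ∧ d.toNat ≤ 122 := by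
        by_contra hne
        simp [pvIdx, hne] at hidx
        omega
      have : d.toNat = c.toNat := by
        simp [pvIdx, hdl] at hidx; omega
      have : d = c := by
        rw [← Char.ofNat_toNat d, this, Char.ofNat_toNat]
      rwa [← this]
    · intro hc
      rw [mem_pvAlpha_iff]
      by_contra hne
      have : pvIdx c = 26 := by simp [pvIdx, hne]
      have := (hbit 26).mp ⟨c, hc, this⟩
      omega
  · intro h
    apply Nat.eq_of_testBit_eq
    intro i
    rw [hfull, Nat.testBit_two_pow_sub_one]
    rcases Nat.lt_or_ge i 26 with hi | hi
    · simp only [hi, decide_true]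
      rw [testBit_pvMaskL]
      refine ⟨Char.ofNat (97 + i), ?_, ?_⟩
      · apply (h _).mp
        rw [mem_pvAlpha_iff, toNat_ofNat_letter i hi]; omega
      · rw [pvIdx, toNat_ofNat_letter i hi]
        have h2 : 97 ≤ 97 + i ∧ 97 + i ≤ 122 := by omega
        rw [if_pos h2]
        omega
    · have : ¬ i < 26 := by omega
      simp only [this, decide_false]
      rw [Bool.eq_false_iff, Ne, testBit_pvMaskL]
      rintro ⟨c, hc, hidx⟩
      have h1 := (h c).mpr hc
      rw [mem_pvAlpha_iff] at h1
      rw [pvIdx] at hidx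
      simp [h1] at hidx
      omega

lemma equal_iff_mem (s t : List Char) :
    PySem.Set.equal (PySem.Set.ofList s) (PySem.Set.ofList t) = true ↔
      (∀ c, c ∈ s ↔ c ∈ t) := by
  simp only [PySem.Set.equal, PySem.Set.issubset, Bool.and_eq_true, List.all_eq_true,
    PySem.Set.contains_iff]
  constructor
  · rintro ⟨h1, h2⟩ c
    constructor
    · intro hc
      have := h1 c (by simpa [PySem.Set.mem_ofList] using hc)
      simpa [PySem.Set.mem_ofList] using this
    · intro hc
      have := h2 c (by simpa [PySem.Set.mem_ofList] using hc)
      simpa [PySem.Set.mem_ofList] using this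
  · intro h
    constructor
    · intro c hc
      have := (h c).mp (by simpa [PySem.Set.mem_ofList] using hc)
      simpa [PySem.Set.mem_ofList] using this
    · intro c hc
      have := (h c).mpr (by simpa [PySem.Set.mem_ofList] using hc)
      simpa [PySem.Set.mem_ofList] using this

-- the two per-pair conditions are the same Boolean
lemma cond_eq (y x : String) :
    PySem.Set.equal (PySem.Set.ofList "abcdefghijklmnopqrstuvwxyz".toList)
        (PySem.Set.ofList (String.ofList (y.toList ++ x.toList)).toList)
      = ((pvMask y ||| pvMask x) == pvFULL) := by
  have hmask : pvMask y ||| pvMask x = pvMaskL (y.toList ++ x.toList) := by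
    rw [pvMaskL_append]; rfl
  rw [Bool.eq_iff_iff, beq_iff_eq, hmask, pvFULL, mask_full_iff, equal_iff_mem]
  rw [show "abcdefghijklmnopqrstuvwxyz".toList = pvAlpha from by decide]
  simp only [String.toList_ofList]

lemma contains_eq_isSome {κ ν : Type} [BEq κ] (d : PySem.Dict κ ν) (k : κ) :
    d.contains k = (d.get? k).isSome := by
  show (d.items.any fun p => p.1 == k) = _
  have : d.get? k = d.items.find? (fun p => p.1 == k) >>= (fun p => some p.2) := by
    simp [PySem.Dict.get?, Option.map_eq_bind]
  rw [this]
  induction d.items with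
  | nil => rfl
  | cons p t ih =>
    by_cases h : (p.1 == k) = true
    · simp [List.find?, h]
    · simp only [List.any_cons, List.find?, h, Bool.false_or]
      simpa using ih

-- the s2-sublist B memoises for a mask m
def pvGood (s2 : List String) (m : Nat) : List String :=
  s2.filter (fun x => (m ||| pvMask x) == pvFULL)

lemma filter_map_fst (s2 : List String) (m : Nat) :
    ((s2.map (fun x => (x, pvMask x))).filter (fun q => (m ||| q.2) == pvFULL)).map Prod.fst
      = pvGood s2 m := by
  rw [pvGood]
  induction s2 with
  | nil => rfl
  | cons x t ih =>
    simp only [List.map_cons, List.filter_cons]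
    by_cases h : ((m ||| pvMask x) == pvFULL) = true
    · simp [h, ih]
    · simp [h, ih]

-- A's inner loop over s2 = folding Set.add over the memoised sublist
lemma inner_eq (s2 : List String) (y : String) (p : List String) :
    s2.foldl (fun pairs x =>
      let a := String.ofList (y.toList ++ x.toList)
      if PySem.Set.equal (PySem.Set.ofList "abcdefghijklmnopqrstuvwxyz".toList)
                         (PySem.Set.ofList a.toList)
      then PySem.Set.add pairs a else pairs) p
    = (pvGood s2 (pvMask y)).foldl
        (fun p x => PySem.Set.add p (String.ofList (y.toList ++ x.toList))) p := by
  rw [pvGood, List.foldl_filter]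
  induction s2 generalizing p with
  | nil => rfl
  | cons x t ih =>
    simp only [List.foldl_cons]
    rw [cond_eq y x, ih]

-- the memo invariant: every stored entry is pvGood of its key
lemma main_eq (s2 : List String) (s1 : List String) (memo : PySem.Dict Nat (List String))
    (p : List String)
    (hInv : ∀ k v, memo.get? k = some v → v = pvGood s2 k) :
    s1.foldl (fun pairs y =>
      s2.foldl (fun pairs x =>
        let a := String.ofList (y.toList ++ x.toList)
        if PySem.Set.equal (PySem.Set.ofList "abcdefghijklmnopqrstuvwxyz".toList)
                           (PySem.Set.ofList a.toList)
        then PySem.Set.add pairs a else pairs) pairs) p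
    = (s1.foldl (fun (st : PySem.Dict Nat (List String) × List String) y =>
        let my := pvMask y
        let memo := if st.1.contains my then st.1
                    else st.1.insert my
                      (((s2.map (fun x => (x, pvMask x))).filter
                          (fun q => (my ||| q.2) == pvFULL)).map Prod.fst)
        (memo, (memo.getD my []).foldl
          (fun p x => PySem.Set.add p (String.ofList (y.toList ++ x.toList))) st.2))
      (memo, p)).2 := by
  induction s1 generalizing memo p with
  | nil => rfl
  | cons y t ih =>
    simp only [List.foldl_cons]
    by_cases hc : memo.contains (pvMask y) = true
    · rw [hc]
      simp only [if_true]
      rw [contains_eq_isSome] at hc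
      rcases Option.isSome_iff_exists.mp hc with ⟨v, hv⟩
      have hgood : memo.getD (pvMask y) [] = pvGood s2 (pvMask y) := by
        rw [PySem.Dict.getD, hv, Option.getD_some, hInv _ _ hv]
      rw [hgood, ← inner_eq]
      exact ih memo _ hInv
    · rw [Bool.not_eq_true] at hc
      rw [hc]
      simp only [Bool.false_eq_true, if_false]
      set memo' := memo.insert (pvMask y)
        (((s2.map (fun x => (x, pvMask x))).filter
            (fun q => ((pvMask y) ||| q.2) == pvFULL)).map Prod.fst) with hmemo'
      have hInv' : ∀ k v, memo'.get? k = some v → v = pvGood s2 k := by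
        intro k v hkv
        rw [hmemo', PySem.Dict.get?_insert] at hkv
        by_cases hk : k = pvMask y
        · rw [if_pos hk] at hkv
          rw [← Option.some_inj.mp hkv, filter_map_fst, hk]
        · rw [if_neg hk] at hkv
          exact hInv _ _ hkv
      have hgood : memo'.getD (pvMask y) [] = pvGood s2 (pvMask y) := by
        rw [hmemo', PySem.Dict.getD, PySem.Dict.get?_insert, if_pos rfl,
          Option.getD_some, filter_map_fst]
      rw [hgood, ← inner_eq]
      exact ih memo' _ hInv'

-- ===== VERDICT (by name: the statement is the Claim_ definition above) =====
theorem complete_pairs_spec : Claim_equal_complete_pairs := by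
  intro s1 s2 _
  unfold Spec_complete_pairs complete_pairs complete_pairs_alt
  exact main_eq s2 s1 PySem.Dict.empty PySem.Set.empty
    (fun k v h => by rw [PySem.Dict.get?_empty] at h; cases h)
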